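-- pv_equiv track=rewrite | github.com/SuMingWei/SketchMercator | result_plots/ProfilingBased/common/common.py | get_metric_mapping
-- ===== SOURCE A (Python) =====
-- def get_metric_mapping(algos = ['univmon', 'cm', 'cs', 'hll', 'lc', 'mrac', 'll', 'mrb']):
--     mapping = {}
--     for k in algos:
--         mapping[k] = {}
--
--     if 'univmon' in algos:
--         # UNIV: [true_entropy, sim_entropy, sim_entropy_error, true_card, sim_card, sim_card_error, ARE]
--         mapping['univmon']['hh'] = 6
--         mapping['univmon']['card'] = 5
--         mapping['univmon']['entropy'] = 2
--     if 'cm' in algos: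
--         # cm: [entropy, entropy_est, relative_entropy_error, sim_ARE_error,
--             # sim_change_detection_error, WMRD, theoretical_error_bound, actual_error_bound]
--         mapping['cm']['hh'] = 3
--         mapping['cm']['entropy'] = 2
--         mapping['cm']['change_det'] = 4
--         mapping['cm']['fsd'] = 5
--         mapping['cm']['theoretical_error_bound'] = 6
--         mapping['cm']['actual_error_bound'] = 7
--     if 'cs' in algos:
--         # cs: [entropy, entropy_est, relative_entropy_error, sim_ARE_error,
--             # sim_change_detection_error, WMRD, theoretical_error_bound, actual_error_bound]
--         mapping['cs']['hh'] = 3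
--         mapping['cs']['entropy'] = 2
--         mapping['cs']['change_det'] = 4
--         mapping['cs']['fsd'] = 5
--         mapping['cs']['theoretical_error_bound'] = 6
--         mapping['cs']['actual_error_bound'] = 7
--     if 'hll' in algos:
--         # hll: [true_cardinality, sim_cardinality, sim_error]
--         mapping['hll']['card'] = 2
--     if 'll' in algos:
--         # ll: [true_cardinality, sim_cardinality, sim_error]
--         mapping['ll']['card'] = 2
--     if 'lc' in algos:
--         # lc: [true_cardinality, sim_cardinality, sim_error]
--         mapping['lc']['card'] = 2
--     if 'mrac' in algos:
--         # mrac: [WMRD, entropy_true, entropy_est, entropy_err]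
--         mapping['mrac']['fsd'] = 0
--         mapping['mrac']['entropy'] = 3
--     if 'mrb' in algos:
--         # mrb: [true_cardinality, sim_cardinality, sim_error]
--         mapping['mrb']['card'] = 2
--     return mapping
-- ===== SOURCE B (Python) =====
-- KNOWN = {
--     'univmon': {'hh': 6, 'card': 5, 'entropy': 2},
--     'cm': {'hh': 3, 'entropy': 2, 'change_det': 4, 'fsd': 5,
--            'theoretical_error_bound': 6, 'actual_error_bound': 7},
--     'cs': {'hh': 3, 'entropy': 2, 'change_det': 4, 'fsd': 5,
--            'theoretical_error_bound': 6, 'actual_error_bound': 7},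
--     'hll': {'card': 2},
--     'll': {'card': 2},
--     'lc': {'card': 2},
--     'mrac': {'fsd': 0, 'entropy': 3},
--     'mrb': {'card': 2},
-- }
--
-- def get_metric_mapping(algos = ['univmon', 'cm', 'cs', 'hll', 'lc', 'mrac', 'll', 'mrb']):
--     mapping = {}
--     for k in algos:
--         mapping[k] = dict(KNOWN.get(k, {}))
--     return mapping
-- ===== Notes on version B (the rewrite author's own statement) =====
-- stated objective: simpler
-- what changed: Replaced the build-then-patch scheme (initialize every key to {}, then eight membership-tested if-blocks that mutate specific inner dicts) by a static KNOWN table and a single data-driven pass that assigns each key a fresh copy of its KNOWN entry (or {}).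
import Mathlib
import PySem

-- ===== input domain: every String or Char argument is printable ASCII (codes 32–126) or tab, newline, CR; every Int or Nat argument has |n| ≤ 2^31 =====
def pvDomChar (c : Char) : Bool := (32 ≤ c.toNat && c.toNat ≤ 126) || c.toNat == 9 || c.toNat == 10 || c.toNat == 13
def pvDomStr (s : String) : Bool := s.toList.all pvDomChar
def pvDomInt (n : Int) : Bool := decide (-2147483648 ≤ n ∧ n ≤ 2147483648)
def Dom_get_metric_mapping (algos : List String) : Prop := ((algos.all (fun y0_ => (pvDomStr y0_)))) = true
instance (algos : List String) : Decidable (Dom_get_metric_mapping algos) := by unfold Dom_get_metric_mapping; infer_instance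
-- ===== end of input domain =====

-- B replaces A's eight membership-tested patch blocks by a static KNOWN table and one
-- data-driven pass over the input keys (objective: simpler; same cost).

-- ===== PORT A =====
-- A-side helpers: one def per sequential statement group of A's body, in A's order.
-- mapping = {}; for k in algos: mapping[k] = {}
def pvA0 (algos : List String) : PySem.Dict String (PySem.Dict String Int) :=
  algos.foldl (fun m k => m.insert k PySem.Dict.empty) PySem.Dict.empty
-- if 'univmon' in algos: three item assignments on mapping['univmon']
def pvA1 (algos : List String) : PySem.Dict String (PySem.Dict String Int) :=
  if algos.contains "univmon" then
    (((pvA0 algos).modify "univmon" PySem.Dict.empty (fun d => d.insert "hh" 6)).modify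
        "univmon" PySem.Dict.empty (fun d => d.insert "card" 5)).modify
        "univmon" PySem.Dict.empty (fun d => d.insert "entropy" 2)
  else pvA0 algos
-- if 'cm' in algos: six item assignments on mapping['cm']
def pvA2 (algos : List String) : PySem.Dict String (PySem.Dict String Int) :=
  if algos.contains "cm" then
    ((((((pvA1 algos).modify "cm" PySem.Dict.empty (fun d => d.insert "hh" 3)).modify
        "cm" PySem.Dict.empty (fun d => d.insert "entropy" 2)).modify
        "cm" PySem.Dict.empty (fun d => d.insert "change_det" 4)).modify
        "cm" PySem.Dict.empty (fun d => d.insert "fsd" 5)).modify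
        "cm" PySem.Dict.empty (fun d => d.insert "theoretical_error_bound" 6)).modify
        "cm" PySem.Dict.empty (fun d => d.insert "actual_error_bound" 7)
  else pvA1 algos
-- if 'cs' in algos: six item assignments on mapping['cs']
def pvA3 (algos : List String) : PySem.Dict String (PySem.Dict String Int) :=
  if algos.contains "cs" then
    ((((((pvA2 algos).modify "cs" PySem.Dict.empty (fun d => d.insert "hh" 3)).modify
        "cs" PySem.Dict.empty (fun d => d.insert "entropy" 2)).modify
        "cs" PySem.Dict.empty (fun d => d.insert "change_det" 4)).modify
        "cs" PySem.Dict.empty (fun d => d.insert "fsd" 5)).modify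
        "cs" PySem.Dict.empty (fun d => d.insert "theoretical_error_bound" 6)).modify
        "cs" PySem.Dict.empty (fun d => d.insert "actual_error_bound" 7)
  else pvA2 algos
-- if 'hll' in algos
def pvA4 (algos : List String) : PySem.Dict String (PySem.Dict String Int) :=
  if algos.contains "hll" then
    (pvA3 algos).modify "hll" PySem.Dict.empty (fun d => d.insert "card" 2)
  else pvA3 algos
-- if 'll' in algos
def pvA5 (algos : List String) : PySem.Dict String (PySem.Dict String Int) :=
  if algos.contains "ll" then
    (pvA4 algos).modify "ll" PySem.Dict.empty (fun d => d.insert "card" 2)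
  else pvA4 algos
-- if 'lc' in algos
def pvA6 (algos : List String) : PySem.Dict String (PySem.Dict String Int) :=
  if algos.contains "lc" then
    (pvA5 algos).modify "lc" PySem.Dict.empty (fun d => d.insert "card" 2)
  else pvA5 algos
-- if 'mrac' in algos: two item assignments
def pvA7 (algos : List String) : PySem.Dict String (PySem.Dict String Int) :=
  if algos.contains "mrac" then
    ((pvA6 algos).modify "mrac" PySem.Dict.empty (fun d => d.insert "fsd" 0)).modify
        "mrac" PySem.Dict.empty (fun d => d.insert "entropy" 3)
  else pvA6 algos
-- if 'mrb' in algos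
def pvA8 (algos : List String) : PySem.Dict String (PySem.Dict String Int) :=
  if algos.contains "mrb" then
    (pvA7 algos).modify "mrb" PySem.Dict.empty (fun d => d.insert "card" 2)
  else pvA7 algos

def get_metric_mapping (algos : List String) : List (String × List (String × Int)) :=
  (pvA8 algos).items.map (fun p => (p.1, p.2.items))

-- ===== PORT B =====
-- B-side helper: the module-level KNOWN table of Source B.
def pvKNOWN : PySem.Dict String (PySem.Dict String Int) :=
  PySem.Dict.ofList
    [ ("univmon", PySem.Dict.ofList [("hh", 6), ("card", 5), ("entropy", 2)]),
      ("cm", PySem.Dict.ofList [("hh", 3), ("entropy", 2), ("change_det", 4), ("fsd", 5),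
                                ("theoretical_error_bound", 6), ("actual_error_bound", 7)]),
      ("cs", PySem.Dict.ofList [("hh", 3), ("entropy", 2), ("change_det", 4), ("fsd", 5),
                                ("theoretical_error_bound", 6), ("actual_error_bound", 7)]),
      ("hll", PySem.Dict.ofList [("card", 2)]),
      ("ll", PySem.Dict.ofList [("card", 2)]),
      ("lc", PySem.Dict.ofList [("card", 2)]),
      ("mrac", PySem.Dict.ofList [("fsd", 0), ("entropy", 3)]),
      ("mrb", PySem.Dict.ofList [("card", 2)]) ]

def get_metric_mapping_alt (algos : List String) : List (String × List (String × Int)) :=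
  ((algos.foldl (fun m k => m.insert k (pvKNOWN.getD k PySem.Dict.empty)) PySem.Dict.empty).items).map
    (fun p => (p.1, p.2.items))

-- ===== PRECONDITION & SPEC =====
def Spec_get_metric_mapping (algos : List String) (out : List (String × List (String × Int))) : Prop := out = get_metric_mapping_alt algos
instance (algos : List String) (out : List (String × List (String × Int))) : Decidable (Spec_get_metric_mapping algos out) := by unfold Spec_get_metric_mapping; infer_instance

-- ===== CLAIM (what is proved, stated in full; the proofs are below) =====
def Claim_equal_get_metric_mapping : Prop := ∀ (algos : List String), Dom_get_metric_mapping algos → Spec_get_metric_mapping algos (get_metric_mapping algos)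

-- ===== LEMMAS AND PROOFS =====

-- the value B assigns to key k
def pvKF (k : String) : PySem.Dict String Int := pvKNOWN.getD k PySem.Dict.empty

-- A chain of in-place modifications of the slot at key n
def pvMChain (n : String) (fs : List (PySem.Dict String Int → PySem.Dict String Int))
    (x : PySem.Dict String (PySem.Dict String Int)) : PySem.Dict String (PySem.Dict String Int) :=
  fs.foldl (fun x f => x.modify n PySem.Dict.empty f) x

-- invariant after processing the guarded blocks whose names are in L
def pvPhi (algos L : List String) (d : PySem.Dict String (PySem.Dict String Int)) : Prop :=
  d.keys = PySem.Set.ofList algos ∧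
  ∀ k, d.getD k PySem.Dict.empty =
    if k ∈ L ∧ k ∈ algos then pvKF k else PySem.Dict.empty

theorem pvKF_not_known (k : String)
    (h : k ∉ ["univmon", "cm", "cs", "hll", "ll", "lc", "mrac", "mrb"]) :
    pvKF k = PySem.Dict.empty := by
  simp only [List.mem_cons, not_or] at h
  obtain ⟨h1, h2, h3, h4, h5, h6, h7, h8⟩ := h
  simp [pvKF, pvKNOWN, PySem.Dict.ofList, PySem.Dict.update, PySem.Dict.getD_eq_get?_getD,
    PySem.Dict.get?_insert, PySem.Dict.get?_empty, h1, h2, h3, h4, h5, h6, h7, h8]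

theorem pvMChain_keys (n : String) (fs : List (PySem.Dict String Int → PySem.Dict String Int))
    (x : PySem.Dict String (PySem.Dict String Int)) (hx : n ∈ x.keys) :
    (pvMChain n fs x).keys = x.keys := by
  induction fs generalizing x with
  | nil => rfl
  | cons f t ih =>
    have h1 : (x.modify n PySem.Dict.empty f).keys = x.keys := by
      rw [PySem.Dict.keys_modify, PySem.Dict.keys_insert_of_contains]
      exact (PySem.Dict.contains_iff_mem_keys _ _).mpr hx
    simpa [pvMChain, h1] using ih (x.modify n PySem.Dict.empty f) (h1 ▸ hx)

theorem pvMChain_getD_self (n : String) (fs : List (PySem.Dict String Int → PySem.Dict String Int))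
    (x : PySem.Dict String (PySem.Dict String Int)) :
    (pvMChain n fs x).getD n PySem.Dict.empty =
      fs.foldl (fun v f => f v) (x.getD n PySem.Dict.empty) := by
  induction fs generalizing x with
  | nil => rfl
  | cons f t ih =>
    simp [pvMChain] at ih ⊢
    rw [ih]
    simp [PySem.Dict.getD_modify_self]

theorem pvMChain_getD_ne (n : String) (fs : List (PySem.Dict String Int → PySem.Dict String Int))
    (x : PySem.Dict String (PySem.Dict String Int)) (k : String) (hk : k ≠ n) :
    (pvMChain n fs x).getD k PySem.Dict.empty = x.getD k PySem.Dict.empty := by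
  induction fs generalizing x with
  | nil => rfl
  | cons f t ih =>
    simp [pvMChain] at ih ⊢
    rw [ih]
    simp [PySem.Dict.getD_modify, hk]

theorem pvPhi_step (algos L : List String) (n : String)
    (fs : List (PySem.Dict String Int → PySem.Dict String Int))
    (d : PySem.Dict String (PySem.Dict String Int))
    (hPhi : pvPhi algos L d) (hnL : n ∉ L)
    (hG : fs.foldl (fun v f => f v) PySem.Dict.empty = pvKF n) :
    pvPhi algos (n :: L) (if algos.contains n then pvMChain n fs d else d) := by
  obtain ⟨hkeys, hget⟩ := hPhi
  by_cases hc : algos.contains n = true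
  · have hna : n ∈ algos := by simpa using hc
    have hnk : n ∈ d.keys := by rw [hkeys]; exact (PySem.Set.mem_ofList _ _).mpr hna
    rw [if_pos hc]
    refine ⟨by rw [pvMChain_keys n fs d hnk, hkeys], ?_⟩
    intro k
    by_cases hkn : k = n
    · subst hkn
      rw [pvMChain_getD_self, hget k]
      simp [hna, hnL, hG]
    · rw [pvMChain_getD_ne n fs d k hkn, hget k]
      simp [List.mem_cons, hkn]
  · have hna : n ∉ algos := by simpa using hc
    rw [if_neg hc]
    refine ⟨hkeys, ?_⟩
    intro k
    rw [hget k]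
    by_cases hkn : k = n
    · subst hkn; simp [hna]
    · simp [List.mem_cons, hkn]

theorem pvA0_getD (algos : List String) :
    ∀ (d : PySem.Dict String (PySem.Dict String Int)),
      (∀ j, d.getD j PySem.Dict.empty = PySem.Dict.empty) →
      ∀ j, (algos.foldl (fun m k => m.insert k PySem.Dict.empty) d).getD j PySem.Dict.empty
        = PySem.Dict.empty := by
  induction algos with
  | nil => intro d h j; exact h j
  | cons a t ih =>
    intro d h j
    refine ih _ ?_ j
    intro j'
    rw [PySem.Dict.getD_insert]
    split <;> simp [h]

theorem pvPhi_A0 (algos : List String) : pvPhi algos [] (pvA0 algos) := by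
  constructor
  · rw [pvA0, PySem.Dict.keys_foldl_insert]
    simp [PySem.Set.update, PySem.Set.ofList_eq_foldl]
  · intro k
    simp only [List.not_mem_nil, false_and, if_false]
    exact pvA0_getD algos PySem.Dict.empty (fun j => by simp) k

set_option maxHeartbeats 1000000 in
theorem pvPhi_A8 (algos : List String) :
    pvPhi algos ["mrb", "mrac", "lc", "ll", "hll", "cs", "cm", "univmon"] (pvA8 algos) := by
  have h1 := pvPhi_step algos [] "univmon"
    [fun d => d.insert "hh" 6, fun d => d.insert "card" 5, fun d => d.insert "entropy" 2]
    (pvA0 algos) (pvPhi_A0 algos) (by simp) (by decide)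
  rw [show (if algos.contains "univmon" then pvMChain "univmon" _ (pvA0 algos) else pvA0 algos) = pvA1 algos from rfl] at h1
  have h2 := pvPhi_step algos _ "cm"
    [fun d => d.insert "hh" 3, fun d => d.insert "entropy" 2, fun d => d.insert "change_det" 4,
     fun d => d.insert "fsd" 5, fun d => d.insert "theoretical_error_bound" 6,
     fun d => d.insert "actual_error_bound" 7]
    (pvA1 algos) h1 (by decide) (by decide)
  rw [show (if algos.contains "cm" then pvMChain "cm" _ (pvA1 algos) else pvA1 algos) = pvA2 algos from rfl] at h2
  have h3 := pvPhi_step algos _ "cs"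
    [fun d => d.insert "hh" 3, fun d => d.insert "entropy" 2, fun d => d.insert "change_det" 4,
     fun d => d.insert "fsd" 5, fun d => d.insert "theoretical_error_bound" 6,
     fun d => d.insert "actual_error_bound" 7]
    (pvA2 algos) h2 (by decide) (by decide)
  rw [show (if algos.contains "cs" then pvMChain "cs" _ (pvA2 algos) else pvA2 algos) = pvA3 algos from rfl] at h3
  have h4 := pvPhi_step algos _ "hll" [fun d => d.insert "card" 2]
    (pvA3 algos) h3 (by decide) (by decide)
  rw [show (if algos.contains "hll" then pvMChain "hll" _ (pvA3 algos) else pvA3 algos) = pvA4 algos from rfl] at h4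
  have h5 := pvPhi_step algos _ "ll" [fun d => d.insert "card" 2]
    (pvA4 algos) h4 (by decide) (by decide)
  rw [show (if algos.contains "ll" then pvMChain "ll" _ (pvA4 algos) else pvA4 algos) = pvA5 algos from rfl] at h5
  have h6 := pvPhi_step algos _ "lc" [fun d => d.insert "card" 2]
    (pvA5 algos) h5 (by decide) (by decide)
  rw [show (if algos.contains "lc" then pvMChain "lc" _ (pvA5 algos) else pvA5 algos) = pvA6 algos from rfl] at h6
  have h7 := pvPhi_step algos _ "mrac" [fun d => d.insert "fsd" 0, fun d => d.insert "entropy" 3]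
    (pvA6 algos) h6 (by decide) (by decide)
  rw [show (if algos.contains "mrac" then pvMChain "mrac" _ (pvA6 algos) else pvA6 algos) = pvA7 algos from rfl] at h7
  have h8 := pvPhi_step algos _ "mrb" [fun d => d.insert "card" 2]
    (pvA7 algos) h7 (by decide) (by decide)
  rw [show (if algos.contains "mrb" then pvMChain "mrb" _ (pvA7 algos) else pvA7 algos) = pvA8 algos from rfl] at h8
  exact h8

theorem pvA8_items (algos : List String) :
    (pvA8 algos).items = (PySem.Set.ofList algos).map (fun k => (k, pvKF k)) := by
  obtain ⟨hkeys, hget⟩ := pvPhi_A8 algos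
  have hnd : (pvA8 algos).keys.Nodup := by rw [hkeys]; exact PySem.Set.nodup_ofList algos
  rw [PySem.Dict.items_eq_map_keys _ hnd PySem.Dict.empty, hkeys]
  refine List.map_congr_left ?_
  intro k hk
  have hka : k ∈ algos := (PySem.Set.mem_ofList _ _).mp hk
  rw [hget k]
  by_cases hL : k ∈ ["mrb", "mrac", "lc", "ll", "hll", "cs", "cm", "univmon"]
  · simp [hL, hka]
  · have : pvKF k = PySem.Dict.empty := by
      apply pvKF_not_known
      intro hmem
      apply hL
      fin_cases hmem <;> simp
    simp [hL, hka, this]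

theorem pvB_getD_not_mem (t : List String) (d : PySem.Dict String (PySem.Dict String Int))
    (k : String) (hk : k ∉ t) :
    (t.foldl (fun m x => m.insert x (pvKNOWN.getD x PySem.Dict.empty)) d).getD k PySem.Dict.empty
      = d.getD k PySem.Dict.empty := by
  induction t generalizing d with
  | nil => rfl
  | cons a s ih =>
    simp only [List.mem_cons, not_or] at hk
    simp only [List.foldl_cons]
    rw [ih _ hk.2, PySem.Dict.getD_insert, if_neg hk.1]

theorem pvB_getD (algos : List String) (k : String) (hk : k ∈ algos) :
    ∀ (d : PySem.Dict String (PySem.Dict String Int)),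
    (algos.foldl (fun m x => m.insert x (pvKNOWN.getD x PySem.Dict.empty)) d).getD k PySem.Dict.empty
      = pvKF k := by
  induction algos with
  | nil => cases hk
  | cons a t ih =>
    intro d
    simp only [List.foldl_cons]
    by_cases hkt : k ∈ t
    · exact ih hkt _
    · have hka : k = a := by rcases List.mem_cons.mp hk with h | h; exact h; exact absurd h hkt
      subst hka
      rw [pvB_getD_not_mem t _ k hkt, PySem.Dict.getD_insert, if_pos rfl, pvKF]

theorem pvB_items (algos : List String) :
    (algos.foldl (fun m k => m.insert k (pvKNOWN.getD k PySem.Dict.empty)) PySem.Dict.empty).items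
      = (PySem.Set.ofList algos).map (fun k => (k, pvKF k)) := by
  have hkeys : (algos.foldl (fun m k => m.insert k (pvKNOWN.getD k PySem.Dict.empty)) PySem.Dict.empty).keys
      = PySem.Set.ofList algos := by
    rw [PySem.Dict.keys_foldl_insert (f := fun _ k => pvKNOWN.getD k PySem.Dict.empty)]
    simp [PySem.Set.update, PySem.Set.ofList_eq_foldl]
  have hnd : (algos.foldl (fun m k => m.insert k (pvKNOWN.getD k PySem.Dict.empty)) PySem.Dict.empty).keys.Nodup := by
    rw [hkeys]; exact PySem.Set.nodup_ofList algos
  rw [PySem.Dict.items_eq_map_keys _ hnd PySem.Dict.empty, hkeys]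
  refine List.map_congr_left ?_
  intro k hk
  rw [pvB_getD algos k ((PySem.Set.mem_ofList _ _).mp hk) PySem.Dict.empty]

-- ===== VERDICT (by name: the statement is the Claim_ definition above) =====
theorem get_metric_mapping_spec : Claim_equal_get_metric_mapping := by
  intro algos _
  unfold Spec_get_metric_mapping get_metric_mapping get_metric_mapping_alt
  rw [pvA8_items, pvB_items]
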